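-- pv_equiv track=rewrite | github.com/lmizner/Data_Structures_Coding_Interviews | Hashing/word_formation.py | is_formation_possible
-- ===== SOURCE A (Python) =====
-- def is_formation_possible(words_list, target):
--
--     # Initialize an empty hash table
--     hash_table = {}
--
--     # Insert each word from the list into the hash table as a key
--     for word in words_list:
--         hash_table[word] = True
--
--     # Iterate over each index of the word to check for possible formations
--     for i in range(1, len(target)):
--         prefix = target[:i]
--         suffix = target[i:]
--
--         # Check if both prefix and suffix exist as keys in the hash table
--         if hash_table.get(prefix) and hash_table.get(suffix):
--             return True
--
--     return False
-- ===== SOURCE B (Python) =====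
-- def is_formation_possible(words_list, target):
--     words = set(words_list)
--     n = len(target)
--     for word in words_list:
--         if 0 < len(word) < n and target.startswith(word) and target[len(word):] in words:
--             return True
--     return False
-- ===== Notes on version B (the rewrite author's own statement) =====
-- stated objective: faster
-- what changed: Instead of scanning every split index of target and looking both halves up, B iterates over the candidate words, tests each as a prefix via startswith and does one suffix set lookup.
import Mathlib
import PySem

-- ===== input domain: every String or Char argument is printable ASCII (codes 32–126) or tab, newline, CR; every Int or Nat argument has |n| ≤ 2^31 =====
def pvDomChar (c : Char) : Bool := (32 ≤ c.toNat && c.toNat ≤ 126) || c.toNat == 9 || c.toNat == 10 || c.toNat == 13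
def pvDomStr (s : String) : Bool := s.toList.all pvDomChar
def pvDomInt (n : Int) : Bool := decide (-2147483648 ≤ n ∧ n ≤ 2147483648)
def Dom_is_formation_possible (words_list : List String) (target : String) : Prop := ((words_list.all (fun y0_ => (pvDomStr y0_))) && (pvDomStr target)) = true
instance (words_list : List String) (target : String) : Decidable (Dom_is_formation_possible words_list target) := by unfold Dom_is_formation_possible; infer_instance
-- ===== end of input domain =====

-- B iterates over the candidate words (startswith + one suffix set lookup) instead of A's scan over every split index of target.

-- ===== PORT A =====
def is_formation_possible (words_list : List String) (target : String) : Bool :=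
  let hash_table : PySem.Dict String Bool :=
    words_list.foldl (fun d word => d.insert word true) PySem.Dict.empty
  (PySem.List.pyRange 1 (PySem.Str.len target) 1).any (fun i =>
    let pfx := PySem.Str.slice target none (some i)
    let sfx := PySem.Str.slice target (some i) none
    hash_table.getD pfx false && hash_table.getD sfx false)

-- ===== PORT B =====
def is_formation_possible_alt (words_list : List String) (target : String) : Bool :=
  let words : PySem.Set String := PySem.Set.ofList words_list
  let n := PySem.Str.len target
  words_list.any (fun word =>
    (0 < PySem.Str.len word && PySem.Str.len word < n) &&
    PySem.Str.startswith target word &&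
    PySem.Set.contains words (PySem.Str.slice target (some (PySem.Str.len word)) none))

-- ===== PRECONDITION & SPEC =====
def Spec_is_formation_possible (words_list : List String) (target : String) (out : Bool) : Prop := out = is_formation_possible_alt words_list target
instance (words_list : List String) (target : String) (out : Bool) : Decidable (Spec_is_formation_possible words_list target out) := by unfold Spec_is_formation_possible; infer_instance

-- ===== CLAIM (what is proved, stated in full; the proofs are below) =====
def Claim_equal_is_formation_possible : Prop := ∀ (words_list : List String) (target : String), Dom_is_formation_possible words_list target → Spec_is_formation_possible words_list target (is_formation_possible words_list target)

-- ===== LEMMAS AND PROOFS =====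

-- A's loop-built table holds exactly the words of the list
lemma table_getD (l : List String) (d : PySem.Dict String Bool) (k : String) :
    (l.foldl (fun d word => d.insert word true) d).getD k false = true ↔
      d.getD k false = true ∨ k ∈ l := by
  induction l generalizing d with
  | nil => simp
  | cons w l ih =>
      simp only [List.foldl_cons, ih, PySem.Dict.getD_insert, List.mem_cons]
      by_cases h : k = w <;> simp [h]

-- ===== VERDICT (by name: the statement is the Claim_ definition above) =====
theorem is_formation_possible_spec : Claim_equal_is_formation_possible := by
  intro words_list target _
  unfold Spec_is_formation_possible
  simp only [is_formation_possible, is_formation_possible_alt]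
  rw [Bool.eq_iff_iff]
  simp only [List.any_eq_true, Bool.and_eq_true, table_getD, PySem.Dict.getD_empty,
    Bool.false_eq_true, false_or, PySem.Set.contains_iff, PySem.Set.mem_ofList,
    PySem.List.mem_pyRange_one, PySem.Str.startswith_eq, PySem.Chars.startswith_iff,
    PySem.Str.len_eq, decide_eq_true_eq]
  constructor
  · rintro ⟨i, ⟨h1, h2⟩, hp, hs⟩
    have h0 : (0:Int) ≤ i := by omega
    have htl : (PySem.Str.slice target none (some i)).toList = target.toList.take i.toNat := by
      simp [PySem.List.slice_to _ h0]
    have hlen : (PySem.Str.slice target none (some i)).toList.length = i.toNat := by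
      rw [htl]; simp only [List.length_take]; omega
    refine ⟨PySem.Str.slice target none (some i), hp, ⟨⟨?_, ?_⟩, ?_⟩, ?_⟩
    · rw [hlen]; omega
    · rw [hlen]; omega
    · rw [htl]; exact List.take_prefix _ _
    · rw [hlen, Int.toNat_of_nonneg h0]; exact hs
  · rintro ⟨w, hw, ⟨⟨h0, hlt⟩, hp⟩, hs⟩
    refine ⟨(w.toList.length : Int), ⟨by omega, hlt⟩, ?_, hs⟩
    have hweq : PySem.Str.slice target none (some (w.toList.length : Int)) = w := by
      apply String.toList_inj.mp
      simp
      exact (List.prefix_iff_eq_take.mp hp).symm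
    rw [hweq]; exact hw
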